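-- pv_equiv track=rewrite | github.com/mzmjhd/prop-and-fol-logic-parser | tableau.py | get_constants_from_branch
-- ===== SOURCE A (Python) =====
-- def get_constants_from_branch(branch_formulas):
--     all_text = "".join(branch_formulas)
--     found_consts = set()
--     for i, char in enumerate(all_text):
--         if char == 'c':
--             constNum = ""
--             j = i + 1 #checks the imm next character for a number
--             while j < len(all_text) and all_text[j].isdigit():
--                 constNum += all_text[j]
--                 j += 1
--             if constNum:
--                 found_consts.add(f'c{constNum}')
--     return found_consts
-- ===== SOURCE B (Python) =====
-- def get_constants_from_branch(branch_formulas):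
--     # One-pass state machine: no index arithmetic, no inner digit loop.
--     found = set()
--     pending = None  # digit run collected after the most recent 'c', or None
--     for ch in "".join(branch_formulas):
--         if ch == 'c':
--             if pending:
--                 found.add('c' + pending)
--             pending = ""
--         elif pending is not None and ch.isdigit():
--             pending += ch
--         else:
--             if pending:
--                 found.add('c' + pending)
--             pending = None
--     if pending:
--         found.add('c' + pending)
--     return found
-- ===== Notes on version B (the rewrite author's own statement) =====
-- stated objective: alternative
-- what changed: Replaces A's enumerate-every-index scan with an inner index-based while loop re-reading the text by a single one-pass state machine that carries the digit run following the most recent 'c' and flushes it at each run boundary.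
import Mathlib
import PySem

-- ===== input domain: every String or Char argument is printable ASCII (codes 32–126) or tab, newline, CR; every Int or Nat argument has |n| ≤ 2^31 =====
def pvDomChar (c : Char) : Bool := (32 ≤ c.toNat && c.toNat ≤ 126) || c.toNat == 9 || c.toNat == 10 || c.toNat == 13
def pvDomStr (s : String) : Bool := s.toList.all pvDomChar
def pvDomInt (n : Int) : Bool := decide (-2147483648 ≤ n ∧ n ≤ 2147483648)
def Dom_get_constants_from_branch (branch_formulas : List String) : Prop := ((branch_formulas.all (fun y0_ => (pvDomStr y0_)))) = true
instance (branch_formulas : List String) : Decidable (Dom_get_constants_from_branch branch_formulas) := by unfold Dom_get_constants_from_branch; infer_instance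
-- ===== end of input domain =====

-- B replaces A's index-driven scan (enumerate over every position + inner while over indices)
-- by a single one-pass state machine carrying the digit run after the most recent 'c'; objective: alternative.

-- ===== PORT A =====
-- inner loop: 'while j < len(all_text) and all_text[j].isdigit(): constNum += all_text[j]; j += 1'
def gcfbCollect (t : List Char) (j : Nat) : List Char :=
  if h : j < t.length then
    if PySem.Chars.isdigit t[j] then t[j] :: gcfbCollect t (j + 1) else []
  else []
termination_by t.length - j

def get_constants_from_branch (branch_formulas : List String) : List String :=
  let all_text := (PySem.Str.join "" branch_formulas).toList
  (PySem.List.enumerate all_text).foldl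
    (fun found_consts p =>
      if p.2 = 'c' then
        let constNum := gcfbCollect all_text ((p.1 + 1).toNat)
        if constNum ≠ [] then PySem.Set.add found_consts (String.ofList ('c' :: constNum))
        else found_consts
      else found_consts)
    (PySem.Set.empty)

-- ===== PORT B =====
-- the body of B's 'for ch in text' loop, on state (found, pending)
def altStep (st : PySem.Set String × Option (List Char)) (ch : Char) :
    PySem.Set String × Option (List Char) :=
  if ch = 'c' then
    match st.2 with
    | some ds =>
        if ds ≠ [] then (PySem.Set.add st.1 (String.ofList ('c' :: ds)), some [])
        else (st.1, some [])
    | none => (st.1, some [])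
  else
    match st.2 with
    | some ds =>
        if PySem.Chars.isdigit ch then (st.1, some (ds ++ [ch]))
        else if ds ≠ [] then (PySem.Set.add st.1 (String.ofList ('c' :: ds)), none)
        else (st.1, none)
    | none => (st.1, none)

-- B's final 'if pending: found.add(...)'
def altFinish (st : PySem.Set String × Option (List Char)) : PySem.Set String :=
  match st.2 with
  | some ds => if ds ≠ [] then PySem.Set.add st.1 (String.ofList ('c' :: ds)) else st.1
  | none => st.1

def get_constants_from_branch_alt (branch_formulas : List String) : List String :=
  let text := (PySem.Str.join "" branch_formulas).toList
  altFinish (text.foldl altStep ((PySem.Set.empty), none))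

-- ===== PRECONDITION & SPEC =====
def Spec_get_constants_from_branch (branch_formulas : List String) (out : List String) : Prop := out = get_constants_from_branch_alt branch_formulas
instance (branch_formulas : List String) (out : List String) : Decidable (Spec_get_constants_from_branch branch_formulas out) := by unfold Spec_get_constants_from_branch; infer_instance

-- ===== CLAIM (what is proved, stated in full; the proofs are below) =====
def Claim_equal_get_constants_from_branch : Prop := ∀ (branch_formulas : List String), Dom_get_constants_from_branch branch_formulas → Spec_get_constants_from_branch branch_formulas (get_constants_from_branch branch_formulas)

-- ===== LEMMAS AND PROOFS =====

-- A's per-'c' flush, as both sides produce it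
def pvFlush (s : PySem.Set String) (ds : List Char) : PySem.Set String :=
  if ds ≠ [] then PySem.Set.add s (String.ofList ('c' :: ds)) else s

-- structural recast of A's loop: at each 'c', flush the maximal digit run that follows
def pvScanA (l : List Char) (s : PySem.Set String) : PySem.Set String :=
  match l with
  | [] => s
  | ch :: rest =>
      pvScanA rest (if ch = 'c' then pvFlush s (rest.takeWhile PySem.Chars.isdigit) else s)

-- A's fold step, named so the lemmas can speak about it (identical to the lambda in port A)
def pvStepA (t : List Char) (found_consts : PySem.Set String) (p : Int × Char) :
    PySem.Set String :=
  if p.2 = 'c' then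
    let constNum := gcfbCollect t ((p.1 + 1).toNat)
    if constNum ≠ [] then PySem.Set.add found_consts (String.ofList ('c' :: constNum))
    else found_consts
  else found_consts

lemma collect_eq (t : List Char) : ∀ (k j : Nat), t.length - j = k →
    gcfbCollect t j = (t.drop j).takeWhile PySem.Chars.isdigit := by
  intro k
  induction k with
  | zero =>
      intro j hk
      have h : ¬ j < t.length := by omega
      rw [gcfbCollect, dif_neg h, List.drop_eq_nil_of_le (by omega)]
      rfl
  | succ k ih =>
      intro j hk
      have h : j < t.length := by omega
      rw [gcfbCollect, dif_pos h, List.drop_eq_getElem_cons h, List.takeWhile_cons]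
      cases hd : PySem.Chars.isdigit t[j] with
      | true => simp only [if_true, ih (j + 1) (by omega)]
      | false => simp

lemma scanA_digits (ds : List Char) (rest : List Char) (s : PySem.Set String)
    (h : ∀ x ∈ ds, PySem.Chars.isdigit x = true) :
    pvScanA (ds ++ rest) s = pvScanA rest s := by
  induction ds generalizing s with
  | nil => rfl
  | cons d ds ih =>
      have hd : PySem.Chars.isdigit d = true := h d (by simp)
      have hc : ¬ (d = 'c') := by
        intro he; subst he; simp [PySem.Chars.isdigit] at hd
      simp only [List.cons_append, pvScanA, if_neg hc]
      exact ih s (fun x hx => h x (by simp [hx]))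

lemma foldA_eq (t : List Char) (k : Nat) : ∀ (n : Nat) (s : PySem.Set String),
    t.length - n = k → n ≤ t.length →
    (PySem.List.enumerate (t.drop n) (n : Int)).foldl (pvStepA t) s
      = pvScanA (t.drop n) s := by
  induction k with
  | zero =>
      intro n s hk hn
      have h : t.length ≤ n := by omega
      rw [List.drop_eq_nil_of_le h]
      simp only [PySem.List.enumerate_nil, List.foldl_nil, pvScanA]
  | succ k ih =>
      intro n s hk hn
      have hlt : n < t.length := by omega
      rw [List.drop_eq_getElem_cons hlt, PySem.List.enumerate_cons, List.foldl_cons]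
      have hcast : ((n : Int)) + 1 = (((n + 1 : Nat)) : Int) := by push_cast; ring
      rw [hcast, ih (n + 1) (pvStepA t s ((n : Int), t[n])) (by omega) (by omega)]
      have hstate : pvStepA t s ((n : Int), t[n])
          = (if t[n] = 'c' then
              pvFlush s ((t.drop (n + 1)).takeWhile PySem.Chars.isdigit) else s) := by
        simp only [pvStepA, pvFlush]
        by_cases hcn : t[n] = 'c'
        · rw [if_pos hcn, if_pos hcn,
            show (((n : Int)) + 1).toNat = n + 1 from by omega,
            collect_eq t (t.length - (n + 1)) (n + 1) rfl]
        · rw [if_neg hcn, if_neg hcn]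
      rw [hstate]
      conv_rhs => rw [pvScanA]

lemma altMain (l : List Char) :
    (∀ s, altFinish (l.foldl altStep (s, none)) = pvScanA l s) ∧
    (∀ ds s, altFinish (l.foldl altStep (s, some ds)) =
      pvScanA (l.dropWhile PySem.Chars.isdigit)
        (pvFlush s (ds ++ l.takeWhile PySem.Chars.isdigit))) := by
  induction l with
  | nil =>
      constructor
      · intro s; rfl
      · intro ds s; simp [altFinish, pvScanA, pvFlush]
  | cons ch rest ih =>
      have hdig : ∀ x ∈ rest.takeWhile PySem.Chars.isdigit, PySem.Chars.isdigit x = true :=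
        fun x hx => List.mem_takeWhile_imp hx
      have hjoin : ∀ s, pvScanA rest s = pvScanA (rest.dropWhile PySem.Chars.isdigit) s := by
        intro s
        conv_lhs => rw [← List.takeWhile_append_dropWhile (p := PySem.Chars.isdigit) (l := rest)]
        exact scanA_digits _ _ _ hdig
      constructor
      · intro s
        by_cases hc : ch = 'c'
        · subst hc
          have hstep : altStep (s, none) 'c' = (s, some []) := by
            simp [altStep]
          rw [List.foldl_cons, hstep, (ih.2) [] s, List.nil_append]
          conv_rhs => rw [pvScanA]
          rw [if_pos rfl, hjoin]
        · have hstep : altStep (s, none) ch = (s, none) := by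
            simp [altStep, hc]
          rw [List.foldl_cons, hstep, (ih.1) s]
          conv_rhs => rw [pvScanA]
          rw [if_neg hc]
      · intro ds s
        by_cases hc : ch = 'c'
        · subst hc
          have htk : (('c' :: rest).takeWhile PySem.Chars.isdigit) = [] := by
            rw [List.takeWhile_cons]
            simp [PySem.Chars.isdigit]
          have hdw : (('c' :: rest).dropWhile PySem.Chars.isdigit) = 'c' :: rest := by
            rw [List.dropWhile_cons]
            simp [PySem.Chars.isdigit]
          have hstep : altStep (s, some ds) 'c' = (pvFlush s ds, some []) := by
            by_cases hds : ds = [] <;> simp [altStep, pvFlush, hds]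
          rw [htk, hdw, List.append_nil, List.foldl_cons, hstep,
            (ih.2) [] (pvFlush s ds), List.nil_append]
          conv_rhs => rw [pvScanA]
          rw [if_pos rfl, hjoin]
        · by_cases hd : PySem.Chars.isdigit ch = true
          · have htk : ((ch :: rest).takeWhile PySem.Chars.isdigit)
                = ch :: rest.takeWhile PySem.Chars.isdigit := by
              rw [List.takeWhile_cons, if_pos hd]
            have hdw : ((ch :: rest).dropWhile PySem.Chars.isdigit)
                = rest.dropWhile PySem.Chars.isdigit := by
              rw [List.dropWhile_cons, if_pos hd]
            have hstep : altStep (s, some ds) ch = (s, some (ds ++ [ch])) := by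
              simp [altStep, hc, hd]
            rw [htk, hdw, List.foldl_cons, hstep, (ih.2) (ds ++ [ch]) s]
            simp [List.append_assoc]
          · have hdf : PySem.Chars.isdigit ch = false := by
              cases hx : PySem.Chars.isdigit ch
              · rfl
              · exact absurd hx hd
            have htk : ((ch :: rest).takeWhile PySem.Chars.isdigit) = [] := by
              rw [List.takeWhile_cons]; simp [hdf]
            have hdw : ((ch :: rest).dropWhile PySem.Chars.isdigit) = ch :: rest := by
              rw [List.dropWhile_cons]; simp [hdf]
            have hstep : altStep (s, some ds) ch = (pvFlush s ds, none) := by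
              by_cases hds : ds = [] <;> simp [altStep, pvFlush, hc, hdf, hds]
            rw [htk, hdw, List.append_nil, List.foldl_cons, hstep, (ih.1) (pvFlush s ds)]
            conv_rhs => rw [pvScanA]
            rw [if_neg hc]

-- ===== VERDICT (by name: the statement is the Claim_ definition above) =====
theorem get_constants_from_branch_spec : Claim_equal_get_constants_from_branch := by
  intro branch_formulas _
  unfold Spec_get_constants_from_branch
  have hA := foldA_eq ((PySem.Str.join "" branch_formulas).toList)
    ((PySem.Str.join "" branch_formulas).toList).length 0 PySem.Set.empty (by omega) (by omega)
  rw [List.drop_zero] at hA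
  have hB := (altMain ((PySem.Str.join "" branch_formulas).toList)).1 PySem.Set.empty
  exact hA.trans hB.symm
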